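-- pv_equiv track=rewrite | github.com/rupimon/TellMeAboutRupanjal | rupanjal_chatbot/app.py | find_relevant_section
-- ===== SOURCE A (Python) =====
-- def find_relevant_section(question):
--     """Find the most relevant section of the resume for the question"""
--     question_lower = question.lower()
--
--     # Define section keywords
--     section_keywords = {
--         'contact': ['contact', 'email', 'phone', 'reach', 'connect', 'address'],
--         'experience': ['experience', 'work', 'job', 'role', 'position', 'company', 'career'],
--         'skills': ['skill', 'technology', 'programming', 'tool', 'technical', 'proficient', 'language'],
--         'education': ['education', 'degree', 'university', 'college', 'study', 'graduation'],
--         'certifications': ['certification', 'certificate', 'certified', 'credential'],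
--         'projects': ['project', 'built', 'developed', 'created', 'implemented', 'worked on'],
--         'summary': ['summary', 'about', 'overview', 'background', 'profile', 'objective']
--     }
--
--     # Find best matching sections
--     matches = []
--     for section, keywords in section_keywords.items():
--         score = sum(1 for keyword in keywords if keyword in question_lower)
--         if score > 0:
--             matches.append((section, score))
--
--     # Sort by relevance
--     matches.sort(key=lambda x: x[1], reverse=True)
--
--     if matches:
--         return matches[0][0]
--     return 'general'
-- ===== SOURCE B (Python) =====
-- def find_relevant_section(question):
--     """Find the most relevant section of the resume for the question"""
--     question_lower = question.lower()
--
--     # Inverted index: flat (keyword, section) pairs, grouped in section order.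
--     keyword_index = [
--         ('contact', 'contact'), ('email', 'contact'), ('phone', 'contact'),
--         ('reach', 'contact'), ('connect', 'contact'), ('address', 'contact'),
--         ('experience', 'experience'), ('work', 'experience'), ('job', 'experience'),
--         ('role', 'experience'), ('position', 'experience'), ('company', 'experience'),
--         ('career', 'experience'),
--         ('skill', 'skills'), ('technology', 'skills'), ('programming', 'skills'),
--         ('tool', 'skills'), ('technical', 'skills'), ('proficient', 'skills'),
--         ('language', 'skills'),
--         ('education', 'education'), ('degree', 'education'), ('university', 'education'),
--         ('college', 'education'), ('study', 'education'), ('graduation', 'education'),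
--         ('certification', 'certifications'), ('certificate', 'certifications'),
--         ('certified', 'certifications'), ('credential', 'certifications'),
--         ('project', 'projects'), ('built', 'projects'), ('developed', 'projects'),
--         ('created', 'projects'), ('implemented', 'projects'), ('worked on', 'projects'),
--         ('summary', 'summary'), ('about', 'summary'), ('overview', 'summary'),
--         ('background', 'summary'), ('profile', 'summary'), ('objective', 'summary'),
--     ]
--
--     # Histogram of matched keywords per section (insertion order = section order).
--     hits = [section for keyword, section in keyword_index if keyword in question_lower]
--     scores = {}
--     for section in hits:
--         scores[section] = scores.get(section, 0) + 1
--
--     # First section with the strictly highest score wins; 'general' if no hit.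
--     best_section, best_score = 'general', 0
--     for section, score in scores.items():
--         if score > best_score:
--             best_section, best_score = section, score
--     return best_section
-- ===== Notes on version B (the rewrite author's own statement) =====
-- stated objective: alternative
-- what changed: Replaces per-section scoring plus a stable descending sort with an inverted keyword->section index: one filter pass collects the matched keywords' sections, a dict histogram counts them per section, and a linear scan over the histogram (strict '>' so the first section wins ties, as the stable sort did) picks the answer.
import Mathlib
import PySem

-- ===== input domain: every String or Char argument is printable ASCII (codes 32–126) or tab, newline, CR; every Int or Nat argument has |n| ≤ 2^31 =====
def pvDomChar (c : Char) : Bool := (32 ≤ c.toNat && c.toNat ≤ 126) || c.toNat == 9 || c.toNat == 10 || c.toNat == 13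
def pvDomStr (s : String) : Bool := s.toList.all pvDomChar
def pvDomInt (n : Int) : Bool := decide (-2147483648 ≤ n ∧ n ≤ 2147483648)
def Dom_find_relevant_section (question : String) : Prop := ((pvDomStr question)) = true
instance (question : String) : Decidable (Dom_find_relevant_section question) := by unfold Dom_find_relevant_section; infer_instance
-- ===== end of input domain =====

-- B replaces per-section scoring + stable descending sort by an inverted keyword->section index,
-- a dict histogram of the matched keywords' sections, and a linear strict-max scan over it.

-- ===== PORT A =====
-- A's section_keywords table (grouped: section -> keyword list)
def pvSectionKeywords : List (String × List String) :=
  [("contact", ["contact", "email", "phone", "reach", "connect", "address"]),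
   ("experience", ["experience", "work", "job", "role", "position", "company", "career"]),
   ("skills", ["skill", "technology", "programming", "tool", "technical", "proficient", "language"]),
   ("education", ["education", "degree", "university", "college", "study", "graduation"]),
   ("certifications", ["certification", "certificate", "certified", "credential"]),
   ("projects", ["project", "built", "developed", "created", "implemented", "worked on"]),
   ("summary", ["summary", "about", "overview", "background", "profile", "objective"])]

-- score = sum(1 for keyword in keywords if keyword in question_lower)
def pvScore (ql : String) (kws : List String) : Int :=
  (kws.map (fun kw => if PySem.Str.isIn kw ql then (1 : Int) else 0)).sum

def find_relevant_section (question : String) : String :=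
  let question_lower := PySem.Str.lower question
  let matched : List (String × Int) :=
    pvSectionKeywords.foldl (fun acc sec =>
      let score := pvScore question_lower sec.2
      if score > 0 then acc ++ [(sec.1, score)] else acc) []
  let sortedMatches := PySem.List.sorted matched (fun x => x.2) true
  match sortedMatches with
  | [] => "general"
  | m :: _ => m.1

-- ===== PORT B =====
-- B's flat inverted index: (keyword, section) pairs, grouped in section order
def pvKeywordIndex : List (String × String) :=
  [("contact", "contact"), ("email", "contact"), ("phone", "contact"),
   ("reach", "contact"), ("connect", "contact"), ("address", "contact"),
   ("experience", "experience"), ("work", "experience"), ("job", "experience"),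
   ("role", "experience"), ("position", "experience"), ("company", "experience"),
   ("career", "experience"),
   ("skill", "skills"), ("technology", "skills"), ("programming", "skills"),
   ("tool", "skills"), ("technical", "skills"), ("proficient", "skills"),
   ("language", "skills"),
   ("education", "education"), ("degree", "education"), ("university", "education"),
   ("college", "education"), ("study", "education"), ("graduation", "education"),
   ("certification", "certifications"), ("certificate", "certifications"),
   ("certified", "certifications"), ("credential", "certifications"),
   ("project", "projects"), ("built", "projects"), ("developed", "projects"),
   ("created", "projects"), ("implemented", "projects"), ("worked on", "projects"),
   ("summary", "summary"), ("about", "summary"), ("overview", "summary"),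
   ("background", "summary"), ("profile", "summary"), ("objective", "summary")]

def find_relevant_section_alt (question : String) : String :=
  let question_lower := PySem.Str.lower question
  -- hits = [section for keyword, section in keyword_index if keyword in question_lower]
  let hits : List String :=
    (pvKeywordIndex.filter (fun p => PySem.Str.isIn p.1 question_lower)).map (fun p => p.2)
  -- scores[section] = scores.get(section, 0) + 1
  let scores : PySem.Dict String Int :=
    hits.foldl (fun d s => d.insert s (d.getD s 0 + 1)) PySem.Dict.empty
  -- linear strict-max scan over scores.items()
  (scores.items.foldl (fun best p => if best.2 < p.2 then p else best)
    ("general", (0 : Int))).1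

-- ===== PRECONDITION & SPEC =====
def Spec_find_relevant_section (question : String) (out : String) : Prop := out = find_relevant_section_alt question
instance (question : String) (out : String) : Decidable (Spec_find_relevant_section question out) := by unfold Spec_find_relevant_section; infer_instance

-- ===== CLAIM (what is proved, stated in full; the proofs are below) =====
def Claim_equal_find_relevant_section : Prop := ∀ (question : String), Dom_find_relevant_section question → Spec_find_relevant_section question (find_relevant_section question)

-- ===== LEMMAS AND PROOFS =====

-- B's flat index is A's grouped table flattened (a fact about the two literal tables)
theorem pvIndex_eq_flat :
    pvKeywordIndex = pvSectionKeywords.flatMap (fun g => g.2.map (fun kw => (kw, g.1))) := by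
  decide

-- A's matches-building loop is "append the positive-score scored pairs", i.e. map-then-filter
theorem pvMatches_eq (ql : String) (secs : List (String × List String)) (acc : List (String × Int)) :
    secs.foldl (fun acc sec =>
      let score := pvScore ql sec.2
      if score > 0 then acc ++ [(sec.1, score)] else acc) acc
    = acc ++ ((secs.map (fun sec => (sec.1, pvScore ql sec.2))).filter (fun q => decide (0 < q.2))) := by
  have h := PySem.List.foldl_append_if (fun sec => decide (0 < pvScore ql sec.2))
      (fun sec => ((sec.1 : String), pvScore ql sec.2)) secs acc
  simpa [List.filter_map, Function.comp] using h

-- the head of the descending stable insertion sort is the running strict-max of the list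
theorem pvHead_insert_fold (L : List (String × Int)) :
    ∀ (y : String × Int) (ys : List (String × Int)),
    ∃ zs, L.foldl (fun acc x => PySem.List.insertBy (fun a b => decide (b.2 < a.2)) x acc) (y :: ys)
        = (L.foldl (fun b x => if b.2 < x.2 then x else b) y) :: zs := by
  induction L with
  | nil => intro y ys; exact ⟨ys, rfl⟩
  | cons x L ih =>
    intro y ys
    by_cases h : y.2 < x.2
    · have hins : PySem.List.insertBy (fun a b => decide (b.2 < a.2)) x (y :: ys) = x :: y :: ys := by
        simp [PySem.List.insertBy, h]
      rw [List.foldl_cons, hins]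
      simpa [h] using ih x (y :: ys)
    · have hins : PySem.List.insertBy (fun a b => decide (b.2 < a.2)) x (y :: ys)
          = y :: PySem.List.insertBy (fun a b => decide (b.2 < a.2)) x ys := by
        simp [PySem.List.insertBy, h]
      rw [List.foldl_cons, hins]
      simpa [h] using ih y (PySem.List.insertBy (fun a b => decide (b.2 < a.2)) x ys)

-- head of sorted(M, key=score, reverse=True) (or 'general' when empty) = running-best fold, for positive scores
theorem pvSorted_head (M : List (String × Int)) (hM : ∀ p ∈ M, 0 < p.2) :
    (match PySem.List.sorted M (fun x => x.2) true with
     | [] => "general"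
     | m :: _ => m.1)
    = (M.foldl (fun b x => if b.2 < x.2 then x else b) ("general", (0 : Int))).1 := by
  cases M with
  | nil => rfl
  | cons m M' =>
    rw [PySem.List.sorted_rev_eq_foldl_insertBy]
    have hins : PySem.List.insertBy (fun a b => decide ((b.2 : Int) < a.2)) m ([] : List (String × Int)) = [m] := by
      simp [PySem.List.insertBy]
    rw [List.foldl_cons, hins]
    obtain ⟨zs, hz⟩ := pvHead_insert_fold M' m []
    rw [hz]
    have hm : (0 : Int) < m.2 := hM m List.mem_cons_self
    simp [hm]

-- folding Set.add from a seed x ∉ l keeps x at the head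
theorem pvFoldl_add_cons (l : List String) :
    ∀ (x : String) (t : List String), x ∉ l →
    l.foldl PySem.Set.add (x :: t) = x :: l.foldl PySem.Set.add t := by
  induction l with
  | nil => intro x t _; rfl
  | cons y l ih =>
    intro x t hx
    have hxy : y ≠ x := fun h => hx (h ▸ List.mem_cons_self)
    have hstep : PySem.Set.add (x :: t) y = x :: PySem.Set.add t y := by
      by_cases hyt : y ∈ t
      · simp [PySem.Set.add_of_mem, hyt, List.mem_cons, hxy]
      · have h1 : y ∉ (x :: t) := by simp [List.mem_cons, hxy, hyt]
        simp [PySem.Set.add_of_not_mem, h1, hyt]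
    rw [List.foldl_cons, hstep, List.foldl_cons]
    exact ih x (PySem.Set.add t y) (fun h => hx (List.mem_cons_of_mem _ h))

-- every element of the flattened matched-sections list is a section name of the table
theorem pvMem_flat (m : String → Bool) (L : List (String × List String)) (x : String)
    (hx : x ∈ L.flatMap (fun g => (g.2.filter m).map (fun _ => g.1))) :
    x ∈ L.map (fun g => g.1) := by
  obtain ⟨g, hg, hx'⟩ := List.mem_flatMap.mp hx
  obtain ⟨_, _, rfl⟩ := List.mem_map.mp hx'
  exact List.mem_map.mpr ⟨g, hg, rfl⟩

-- the histogram of a section-grouped hit list, as items, is the positive-score scored pairs in table order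
theorem pvCounter_grouped (m : String → Bool) (L : List (String × List String))
    (hnd : (L.map (fun g => g.1)).Nodup) :
    (PySem.Dict.counter (L.flatMap (fun g => (g.2.filter m).map (fun _ => g.1)))).items
    = (L.map (fun g => (g.1, ((g.2.countP m : Nat) : Int)))).filter (fun q => decide (0 < q.2)) := by
  induction L with
  | nil => rfl
  | cons g L' ih =>
    have hnd' : (L'.map (fun g => g.1)).Nodup := (List.nodup_cons.mp hnd).2
    have hgs : g.1 ∉ L'.map (fun g => g.1) := (List.nodup_cons.mp hnd).1
    set H' : List String := L'.flatMap (fun g => (g.2.filter m).map (fun _ => g.1)) with hH'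
    have hgH' : g.1 ∉ H' := fun h => hgs (pvMem_flat m L' g.1 h)
    have hblock : ((g.2.filter m).map (fun _ => g.1)) = List.replicate (g.2.countP m) g.1 := by
      rw [List.map_const', List.countP_eq_length_filter]
    rw [List.flatMap_cons, hblock]
    simp only [PySem.Dict.items_counter] at ih ⊢
    cases hc : g.2.countP m with
    | zero =>
      rw [List.replicate_zero, List.nil_append, List.map_cons, List.filter_cons, hc]
      have hfalse : (decide ((0 : Int) < ((0 : Nat) : Int))) = false := by decide
      rw [hfalse]
      simp only [Bool.false_eq_true, if_false]
      exact ih hnd'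
    | succ n =>
      -- Set.ofList (replicate (n+1) s ++ H') = s :: Set.ofList H'
      have hset : PySem.Set.ofList (List.replicate (n+1) g.1 ++ H') = g.1 :: PySem.Set.ofList H' := by
        have h1 : ∀ k, (List.replicate k g.1).foldl PySem.Set.add ([g.1] : List String) = [g.1] := by
          intro k; induction k with
          | zero => rfl
          | succ k ihk =>
            rw [List.replicate_succ, List.foldl_cons]
            have : PySem.Set.add ([g.1] : List String) g.1 = [g.1] := by
              simp [PySem.Set.add_of_mem]
            rw [this]; exact ihk
        show (List.replicate (n+1) g.1 ++ H').foldl PySem.Set.add [] = _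
        rw [List.foldl_append, List.replicate_succ, List.foldl_cons]
        have h2 : PySem.Set.add ([] : List String) g.1 = [g.1] := rfl
        rw [h2, h1 n]
        exact pvFoldl_add_cons H' g.1 [] hgH'
      rw [hset, List.map_cons]
      have hcount_s : (List.replicate (n+1) g.1 ++ H').count g.1 = n + 1 := by
        rw [List.count_append, List.count_replicate, List.count_eq_zero.mpr hgH']
        simp
      have hcount_rest : ∀ k ∈ PySem.Set.ofList H',
          ((List.replicate (n+1) g.1 ++ H').count k : Int) = (H'.count k : Int) := by
        intro k hk
        have hkH' : k ∈ H' := (PySem.Set.mem_ofList H' k).mp hk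
        have hks : (g.1 == k) = false := by
          refine beq_eq_false_iff_ne.mpr ?_
          exact fun h => hgH' (by rw [h]; exact hkH')
        rw [List.count_append, List.count_replicate, hks]
        simp only [Bool.false_eq_true, if_false]
        simp
      rw [hcount_s, List.map_congr_left (fun k hk => by rw [hcount_rest k hk]), ih hnd']
      simp only [List.map_cons, List.filter_cons, hc]
      norm_num

-- filtering-then-projecting the flat index = flattening the per-group matched sections
theorem pvHits_eq (m : String → Bool) (L : List (String × List String)) :
    ((L.flatMap (fun g => g.2.map (fun kw => (kw, g.1)))).filter (fun p => m p.1)).map (fun p => p.2)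
    = L.flatMap (fun g => (g.2.filter m).map (fun _ => g.1)) := by
  rw [List.filter_flatMap, List.map_flatMap]
  refine List.flatMap_congr ?_
  intro g _
  rw [List.filter_map, List.map_map]
  rfl

-- pvScore is the Int cast of countP
theorem pvScore_eq_countP (ql : String) (kws : List String) :
    pvScore ql kws = ((kws.countP (fun kw => PySem.Str.isIn kw ql) : Nat) : Int) := by
  unfold pvScore
  rw [PySem.List.sum_map_ite_one_zero (fun kw => PySem.Str.isIn kw ql) kws]

-- ===== VERDICT (by name: the statement is the Claim_ definition above) =====
theorem find_relevant_section_spec : Claim_equal_find_relevant_section := by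
  intro question _
  unfold Spec_find_relevant_section find_relevant_section find_relevant_section_alt
  set ql := PySem.Str.lower question with hql
  simp only []
  set m : String → Bool := fun kw => PySem.Str.isIn kw ql with hm
  -- A side: matches list = positive-score scored pairs
  rw [pvMatches_eq ql pvSectionKeywords []]
  rw [List.nil_append]
  -- B side: the histogram fold is Counter(hits); hits is the flattened grouped form
  rw [PySem.Dict.foldl_insert_getD_add_one_eq_counter]
  have hhits : (pvKeywordIndex.filter (fun p => PySem.Str.isIn p.1 ql)).map (fun p => p.2)
      = pvSectionKeywords.flatMap (fun g => (g.2.filter m).map (fun _ => g.1)) := by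
    rw [pvIndex_eq_flat]; exact pvHits_eq m pvSectionKeywords
  rw [hhits]
  have hnd : (pvSectionKeywords.map (fun g => g.1)).Nodup := by decide
  rw [pvCounter_grouped m pvSectionKeywords hnd]
  -- both sides are now about the same positive-score list
  have hPP : pvSectionKeywords.map (fun sec => (sec.1, pvScore ql sec.2))
      = pvSectionKeywords.map (fun g => (g.1, ((g.2.countP m : Nat) : Int))) :=
    List.map_congr_left (fun g _ => by rw [pvScore_eq_countP])
  rw [hPP]
  set M := (pvSectionKeywords.map (fun g => (g.1, ((g.2.countP m : Nat) : Int)))).filter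
      (fun q => decide (0 < q.2)) with hM
  have hpos : ∀ p ∈ M, 0 < p.2 := by
    intro p hp
    have := List.of_mem_filter hp
    simpa using this
  exact pvSorted_head M hpos
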